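-- pv_equiv track=rewrite | github.com/ghost171/RobustModels | homework2/3.py | network_bandwidth
-- ===== SOURCE A (Python) =====
-- import heapq
-- import collections
--
-- def network_bandwidth(times: list[list[int]], n: int, x: int) -> int:
--     adjacency_list = collections.defaultdict(list)
--
--     for u, v, w in times:
--         adjacency_list[u].append((v, w))
--
--     heap_for_neighbours = [(0, x)] #starting point with distance 0 (because it's startinf point)
--     visited = set()
--     min_distance = 0
--     while heap_for_neighbours:
--         w, v = heapq.heappop(heap_for_neighbours) #when we visited node we have to pop it from heap
--         if v in visited:
--             continue
--         visited.add(v)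
--         min_distance = max(min_distance, w) # choose between current node's distance and past  node's distnce
--         for v_neighbour, w_neighbour in adjacency_list[v]:
--             if v_neighbour not in visited:
--                 sum_distance = w + w_neighbour
--                 heapq.heappush(heap_for_neighbours, (sum_distance, v_neighbour)) #after  summing bandwidth on the current node we need to visit neighbour nodes
--                                                                                  #if they are not been visited
--     if len(visited) == n:
--         return min_distance
--     else:
--         return -1
-- ===== SOURCE B (Python) =====
-- def network_bandwidth(times: list[list[int]], n: int, x: int) -> int:
--     adj = {}
--     for u, v, w in times:
--         adj.setdefault(u, []).append((v, w))
--
--     dist = {x: 0}          # tentative distance of each not-yet-settled reachable node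
--     visited = set()
--     ans = 0
--     while dist:
--         v, d = min(dist.items(), key=lambda item: (item[1], item[0]))
--         del dist[v]
--         visited.add(v)
--         if d > ans:
--             ans = d
--         for nb, w in adj.get(v, []):
--             if nb not in visited:
--                 nd = d + w
--                 if nb not in dist or nd < dist[nb]:
--                     dist[nb] = nd
--     return ans if len(visited) == n else -1
-- ===== Notes on version B (the rewrite author's own statement) =====
-- stated objective: alternative
-- what changed: Replaces the duplicate-entry binary heap (push every relaxation, pop-and-skip stale entries) by a dictionary of tentative distances with decrease-key in place: each round selects the unsettled node of minimal (distance, node), deletes it, and relaxes its out-edges, so no stale entries and no skip loop exist.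
import Mathlib
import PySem

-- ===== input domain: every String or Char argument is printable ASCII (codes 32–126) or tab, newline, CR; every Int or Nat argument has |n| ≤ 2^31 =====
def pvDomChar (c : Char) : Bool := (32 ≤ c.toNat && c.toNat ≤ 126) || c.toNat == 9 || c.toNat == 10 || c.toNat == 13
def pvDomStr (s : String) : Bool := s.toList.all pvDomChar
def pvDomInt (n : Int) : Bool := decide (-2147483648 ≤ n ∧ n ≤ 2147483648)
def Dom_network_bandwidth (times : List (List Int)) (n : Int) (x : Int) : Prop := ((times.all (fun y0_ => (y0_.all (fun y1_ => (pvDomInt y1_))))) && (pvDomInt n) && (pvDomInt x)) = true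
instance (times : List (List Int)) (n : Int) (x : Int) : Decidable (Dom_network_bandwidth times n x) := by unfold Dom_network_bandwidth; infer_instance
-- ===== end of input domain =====

-- B replaces A's duplicate-entry heap by a dictionary of tentative distances with
-- decrease-key in place (alternative data structure, similar cost; not claimed faster).

-- ===== PORT A =====
-- A's heapq is modelled as a list kept sorted by the tuple order on (weight, node):
-- heappush = ordered insertion, heappop = take the head. This is exact for what A
-- observes of the heap: its multiset of entries and pop-returns-the-minimum.
def pvPush (e : Int × Int) : List (Int × Int) → List (Int × Int)
  | [] => [e]
  | a :: t => if e.1 < a.1 ∨ (e.1 = a.1 ∧ e.2 ≤ a.2) then e :: a :: t else a :: pvPush e t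

-- adjacency_list[u].append((v, w)) on a defaultdict(list)
def pvAdjA (times : List (List Int)) : PySem.Dict Int (List (Int × Int)) :=
  times.foldl (fun d row =>
    match row with
    | [u, v, w] => d.modify u [] (fun l => l ++ [(v, w)])
    | _ => d) PySem.Dict.empty   -- a row that is not [u, v, w] raises in Python; excluded by Pre_

-- the while-loop; fuel times.length + 1 is exact: every heap entry except the initial
-- one is pushed by a distinct edge whose source is newly visited, so the number of
-- pops (loop iterations) never exceeds times.length + 1 (proved via pvSv below)
def pvRunA (adj : PySem.Dict Int (List (Int × Int))) :
    Nat → List (Int × Int) → PySem.Set Int → Int → PySem.Set Int × Int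
  | 0, _, visited, ans => (visited, ans)
  | _ + 1, [], visited, ans => (visited, ans)
  | fuel + 1, (w, v) :: rest, visited, ans =>
    if v ∈ visited then pvRunA adj fuel rest visited ans
    else
      let visited' := PySem.Set.add visited v
      let ans' := max ans w
      let heap' := (adj.getD v []).foldl
        (fun h p => if p.1 ∈ visited' then h else pvPush (w + p.2, p.1) h) rest
      pvRunA adj fuel heap' visited' ans'

def network_bandwidth (times : List (List Int)) (n : Int) (x : Int) : Int :=
  let adj := pvAdjA times
  let r := pvRunA adj (times.length + 1) [(0, x)] PySem.Set.empty 0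
  if (r.1.length : Int) = n then r.2 else -1

-- ===== PORT B =====
-- the while-loop of Source B; fuel times.length + 1 is exact: every key ever present in
-- dist is x or the target of some edge, each iteration settles a distinct key and a
-- settled key is never re-inserted, so iterations ≤ times.length + 1
def pvRunB (adj : PySem.Dict Int (List (Int × Int))) :
    Nat → PySem.Dict Int Int → PySem.Set Int → Int → PySem.Set Int × Int
  | 0, _, visited, ans => (visited, ans)
  | fuel + 1, dist, visited, ans =>
    match PySem.List.min2? dist.items (fun it => it.2) (fun it => it.1) with
    | none => (visited, ans)                                   -- while dist: exhausted
    | some (v, d) =>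
      let dist' := dist.erase v
      let visited' := PySem.Set.add visited v
      let ans' := if ans < d then d else ans
      let dist'' := (adj.getD v []).foldl
        (fun dd p =>
          if p.1 ∈ visited' then dd
          else if dd.contains p.1 = false ∨ d + p.2 < dd.getD p.1 0
          then dd.insert p.1 (d + p.2) else dd)
        dist'
      pvRunB adj fuel dist'' visited' ans'

def network_bandwidth_alt (times : List (List Int)) (n : Int) (x : Int) : Int :=
  let adj := times.foldl (fun d row =>
    match row with
    | [u, v, w] => d.insert u ((d.getD u []) ++ [(v, w)])   -- adj.setdefault(u, []).append((v, w))
    | _ => d) PySem.Dict.empty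
  let r := pvRunB adj (times.length + 1) (PySem.Dict.empty.insert x 0) PySem.Set.empty 0
  if (r.1.length : Int) = n then r.2 else -1

-- ===== PRECONDITION & SPEC =====
-- Pre_ excludes exactly the rows Python cannot unpack as 'u, v, w': both programs raise ValueError there.
def Pre_network_bandwidth (times : List (List Int)) (n : Int) (x : Int) : Prop :=
  ∀ row ∈ times, row.length = 3
instance (times : List (List Int)) (n : Int) (x : Int) : Decidable (Pre_network_bandwidth times n x) := by unfold Pre_network_bandwidth; infer_instance

def pvWitness_network_bandwidth : List (List Int) × Int × Int := ([[1, 2, 3]], 2, 1)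

def Spec_network_bandwidth (times : List (List Int)) (n : Int) (x : Int) (out : Int) : Prop := out = network_bandwidth_alt times n x
instance (times : List (List Int)) (n : Int) (x : Int) (out : Int) : Decidable (Spec_network_bandwidth times n x out) := by unfold Spec_network_bandwidth; infer_instance

-- ===== CLAIM (what is proved, stated in full; the proofs are below) =====
def Claim_equal_network_bandwidth : Prop := ∀ (times : List (List Int)) (n : Int) (x : Int), Dom_network_bandwidth times n x → Pre_network_bandwidth times n x → Spec_network_bandwidth times n x (network_bandwidth times n x)

-- ===== LEMMAS AND PROOFS =====

-- the tuple order A's heap uses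
def pvLe (a b : Int × Int) : Prop := a.1 < b.1 ∨ (a.1 = b.1 ∧ a.2 ≤ b.2)

-- minimum weight of the heap entries of node u (order-free characterisation)
def pvWmin (h : List (Int × Int)) (u : Int) : Option Int :=
  ((h.filter (fun e => e.2 == u)).map Prod.fst).min?

-- the coupling invariant: B's dict holds, for every unsettled node, exactly the
-- minimum weight among A's heap entries for that node (and nothing for settled ones)
def pvInv (h : List (Int × Int)) (dist : PySem.Dict Int Int) (visited : List Int) : Prop :=
  ∀ u : Int, dist.get? u = if u ∈ visited then none else pvWmin h u

-- number of edges whose source is not yet visited (fuel budget for A's pending pushes)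
def pvSv (adj : PySem.Dict Int (List (Int × Int))) (visited : List Int) : Nat :=
  ((adj.items.filter (fun kv => decide (kv.1 ∉ visited))).map (fun kv => kv.2.length)).sum

lemma pvPush_perm (e : Int × Int) (h : List (Int × Int)) : (pvPush e h).Perm (e :: h) := by
  induction h with
  | nil => simp [pvPush]
  | cons a t ih =>
    by_cases hc : e.1 < a.1 ∨ (e.1 = a.1 ∧ e.2 ≤ a.2)
    · simp [pvPush, hc]
    · simp only [pvPush, if_neg hc]
      exact ((ih.cons a).trans (List.Perm.swap e a t))

lemma pvPush_sorted (e : Int × Int) (h : List (Int × Int)) (hs : h.Pairwise pvLe) :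
    (pvPush e h).Pairwise pvLe := by
  induction h with
  | nil => simp [pvPush, pvLe]
  | cons a t ih =>
    rcases List.pairwise_cons.mp hs with ⟨ha, ht⟩
    by_cases hc : e.1 < a.1 ∨ (e.1 = a.1 ∧ e.2 ≤ a.2)
    · simp only [pvPush, if_pos hc]
      refine List.pairwise_cons.mpr ⟨?_, hs⟩
      intro b hb
      rcases List.mem_cons.mp hb with hb | hb
      · subst hb; exact hc
      · have := ha b hb
        unfold pvLe at *; omega
    · simp only [pvPush, if_neg hc]
      refine List.pairwise_cons.mpr ⟨?_, ih ht⟩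
      intro b hb
      have hb' := (pvPush_perm e t).mem_iff.mp hb
      rcases List.mem_cons.mp hb' with hb' | hb'
      · subst hb'; unfold pvLe; omega
      · exact ha b hb'

lemma pvWmin_perm {h h' : List (Int × Int)} (hp : h.Perm h') (u : Int) :
    pvWmin h u = pvWmin h' u := by
  unfold pvWmin
  have hperm := (hp.filter (fun e => e.2 == u)).map Prod.fst
  cases hm : ((h'.filter (fun e => e.2 == u)).map Prod.fst).min? with
  | none =>
    rw [List.min?_eq_none_iff] at hm ⊢
    exact (hm ▸ hperm).eq_nil
  | some m =>
    rw [List.min?_eq_some_iff] at hm ⊢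
    exact ⟨hperm.mem_iff.mpr hm.1, fun b hb => hm.2 b (hperm.mem_iff.mp hb)⟩

lemma pvWmin_cons_ne {e : Int × Int} {u : Int} (h : List (Int × Int)) (hne : e.2 ≠ u) :
    pvWmin (e :: h) u = pvWmin h u := by
  unfold pvWmin
  simp [List.filter_cons, hne]

lemma pvWmin_head {w v : Int} {rest : List (Int × Int)}
    (hs : ((w, v) :: rest).Pairwise pvLe) : pvWmin ((w, v) :: rest) v = some w := by
  unfold pvWmin
  rw [List.min?_eq_some_iff]
  constructor
  · simp [List.filter_cons]
  · intro b hb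
    simp only [List.mem_map, List.mem_filter] at hb
    rcases hb with ⟨e, ⟨he, hev⟩, rfl⟩
    rcases List.mem_cons.mp he with he | he
    · simp [he]
    · have := (List.pairwise_cons.mp hs).1 e he
      have hev' : e.2 = v := by simpa using hev
      unfold pvLe at this; omega

lemma pvWmin_push_ne {e : Int × Int} {u : Int} (h : List (Int × Int)) (hne : e.2 ≠ u) :
    pvWmin (pvPush e h) u = pvWmin h u := by
  rw [pvWmin_perm (pvPush_perm e h) u, pvWmin_cons_ne h hne]

lemma pvWmin_push_self {e : Int × Int} (h : List (Int × Int)) :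
    pvWmin (pvPush e h) e.2 =
      some ((pvWmin h e.2).elim e.1 (fun m => min e.1 m)) := by
  rw [pvWmin_perm (pvPush_perm e h) e.2]
  unfold pvWmin
  simp only [List.filter_cons, beq_self_eq_true, if_pos, List.map_cons]
  rw [List.min?_cons]

-- a dict whose every lookup fails is the empty association list
lemma pvDict_items_nil (d : PySem.Dict Int Int) (h : ∀ u, d.get? u = none) :
    d.items = [] := by
  cases hd : d.items with
  | nil => rfl
  | cons p t =>
    have : d.get? p.1 = none := h p.1
    simp [PySem.Dict.get?, hd] at this

-- get? after erase
lemma pvGet?_erase (d : PySem.Dict Int Int) (k u : Int) :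
    (d.erase k).get? u = if u = k then none else d.get? u := by
  simp only [PySem.Dict.erase, PySem.Dict.get?]
  induction d.items with
  | nil => simp
  | cons p t ih =>
    rcases p with ⟨a, b⟩
    by_cases hak : a = k <;> by_cases hau : a = u <;>
      simp_all [List.filter_cons, List.find?_cons] <;> omega

lemma pvNodup_keys_erase (d : PySem.Dict Int Int) (k : Int) (h : d.keys.Nodup) :
    (d.erase k).keys.Nodup := by
  simp only [PySem.Dict.keys, PySem.Dict.erase] at *
  exact List.Sublist.nodup (List.Sublist.map Prod.fst List.filter_sublist) h

-- first-minimal-element spec for PySem.List.min2? (mine: the prelude states no lemmas for min2?)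
def pvD (m y : Int × Int) : Prop := m.2 < y.2 ∨ (m.2 = y.2 ∧ m.1 < y.1)

lemma pvMin2?_keep (m : Int × Int) (xs : List (Int × Int)) (hd : ∀ y ∈ xs, y = m ∨ pvD m y) :
    List.foldl (fun acc (x : Int × Int) =>
      match acc with
      | none => some x
      | some mm => if (decide (x.2 < mm.2) || !decide (mm.2 < x.2) && decide (x.1 < mm.1)) = true then some x else some mm)
      (some m) xs = some m := by
  induction xs with
  | nil => rfl
  | cons y t ih =>
    have hy := hd y (by simp)
    have hstep : (if (decide (y.2 < m.2) || !decide (m.2 < y.2) && decide (y.1 < m.1)) = true then some y else some m) = some m := by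
      rcases hy with rfl | hy
      · simp
      · unfold pvD at hy
        have h1 : ¬ (y.2 < m.2) := by omega
        rcases hy with h | ⟨h, h2⟩
        · simp [h1, h]
        · simp [h1, h.symm, show ¬ (y.1 < m.1) by omega]
    simp only [List.foldl_cons, hstep]
    exact ih (fun z hz => hd z (List.mem_cons_of_mem _ hz))

lemma pvMin2?_reach (m : Int × Int) : ∀ (xs : List (Int × Int)), m ∈ xs → (∀ y ∈ xs, y = m ∨ pvD m y) →
    ∀ b, pvD m b →
    List.foldl (fun acc (x : Int × Int) =>
      match acc with
      | none => some x
      | some mm => if (decide (x.2 < mm.2) || !decide (mm.2 < x.2) && decide (x.1 < mm.1)) = true then some x else some mm)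
      (some b) xs = some m := by
  intro xs
  induction xs with
  | nil => simp
  | cons y t ih =>
    intro hm hd b hb
    by_cases hy : y = m
    · subst hy
      have hstep : (if (decide (y.2 < b.2) || !decide (b.2 < y.2) && decide (y.1 < b.1)) = true then some y else some b) = some y := by
        unfold pvD at hb
        rcases hb with h | ⟨h, h2⟩
        · simp [h]
        · simp [h.symm, h2, show ¬ (b.2 < y.2) by omega]
      simp only [List.foldl_cons, hstep]
      exact pvMin2?_keep y t (fun z hz => hd z (List.mem_cons_of_mem _ hz))
    · have hm' : m ∈ t := (List.mem_cons.mp hm).resolve_left (fun h => hy h.symm)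
      have hyD : pvD m y := (hd y (by simp)).resolve_left hy
      simp only [List.foldl_cons]
      by_cases hc : (decide (y.2 < b.2) || !decide (b.2 < y.2) && decide (y.1 < b.1)) = true
      · rw [if_pos hc]
        exact ih hm' (fun z hz => hd z (List.mem_cons_of_mem _ hz)) y hyD
      · rw [if_neg hc]
        exact ih hm' (fun z hz => hd z (List.mem_cons_of_mem _ hz)) b hb

lemma pvMin2?_eq (xs : List (Int × Int)) : PySem.List.min2? xs (fun it => it.2) (fun it => it.1) =
    List.foldl (fun acc (x : Int × Int) =>
      match acc with
      | none => some x
      | some mm => if (decide (x.2 < mm.2) || !decide (mm.2 < x.2) && decide (x.1 < mm.1)) = true then some x else some mm)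
      none xs := by
  unfold PySem.List.min2?
  congr 1
  funext acc x
  cases acc <;> rfl

lemma pvMin2?_spec (xs : List (Int × Int)) (m : Int × Int) (hm : m ∈ xs)
    (hd : ∀ y ∈ xs, y = m ∨ m.2 < y.2 ∨ (m.2 = y.2 ∧ m.1 < y.1)) :
    PySem.List.min2? xs (fun it => it.2) (fun it => it.1) = some m := by
  rw [pvMin2?_eq]
  cases xs with
  | nil => simp at hm
  | cons y t =>
    simp only [List.foldl_cons]
    by_cases hy : y = m
    · subst hy
      exact pvMin2?_keep y t (fun z hz => hd z (List.mem_cons_of_mem _ hz))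
    · have hm' : m ∈ t := (List.mem_cons.mp hm).resolve_left (fun h => hy h.symm)
      have hyD : pvD m y := (hd y (by simp)).resolve_left hy
      exact pvMin2?_reach m t hm' (fun z hz => hd z (List.mem_cons_of_mem _ hz)) y hyD

-- pvSv bookkeeping: the fuel budget for A's pending pushes
lemma pvAdjA_keys_nodup (times : List (List Int)) : (pvAdjA times).keys.Nodup := by
  unfold pvAdjA
  suffices h : ∀ (d : PySem.Dict Int (List (Int × Int))), d.keys.Nodup →
      (times.foldl (fun d row =>
        match row with
        | [u, v, w] => d.modify u [] (fun l => l ++ [(v, w)])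
        | _ => d) d).keys.Nodup by
    exact h PySem.Dict.empty (by simp [PySem.Dict.keys, PySem.Dict.empty])
  induction times with
  | nil => intro d hd; simpa using hd
  | cons row t ih =>
    intro d hd
    simp only [List.foldl_cons]
    apply ih
    match row with
    | [] => exact hd
    | [u] => exact hd
    | [u, v] => exact hd
    | [u, v, w] => exact PySem.Dict.nodup_keys_insert _ _ _ hd
    | u :: v :: w :: y :: rest => exact hd

-- the sum of all adjacency-value lengths grows by at most one per row
lemma pvSumVal_insert (l : List (Int × List (Int × Int))) (u : Int) (e : Int × Int)
    (hnd : (l.map Prod.fst).Nodup) :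
    ((PySem.Dict.insert ⟨l⟩ u ((PySem.Dict.getD ⟨l⟩ u []) ++ [e])).items.map (fun kv => kv.2.length)).sum
      = (l.map (fun kv => kv.2.length)).sum + 1 := by
  simp only [PySem.Dict.insert]
  by_cases hc : (PySem.Dict.contains ⟨l⟩ u) = true
  · simp only [hc, if_pos]
    simp only [PySem.Dict.contains] at hc
    induction l with
    | nil => simp at hc
    | cons p t ih =>
      rcases p with ⟨a, val⟩
      by_cases hau : a = u
      · subst hau
        have hgd : PySem.Dict.getD (⟨(a, val) :: t⟩ : PySem.Dict Int (List (Int × Int))) a [] = val := by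
          simp [PySem.Dict.getD, PySem.Dict.get?, List.find?_cons]
        rw [hgd]
        simp only [List.map_cons, beq_self_eq_true, if_pos, List.map_cons, List.sum_cons]
        have hnotin : a ∉ t.map Prod.fst := by simpa using (List.nodup_cons.mp hnd).1
        have : (t.map (fun p => if (p.1 == a) = true then (a, val ++ [e]) else p)) = t := by
          apply List.map_congr_left ?_ |>.trans (List.map_id _)
          intro p hp
          have : p.1 ≠ a := fun h => hnotin (h ▸ List.mem_map_of_mem hp)
          simp [this]
        rw [this]
        simp [List.length_append]
        omega
      · have hgd : PySem.Dict.getD (⟨(a, val) :: t⟩ : PySem.Dict Int (List (Int × Int))) u []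
            = PySem.Dict.getD (⟨t⟩ : PySem.Dict Int (List (Int × Int))) u [] := by
          simp [PySem.Dict.getD, PySem.Dict.get?, List.find?_cons, show (a == u) = false by simpa using hau]
        rw [hgd]
        have hc' : List.any t (fun p => p.1 == u) = true := by
          simpa [List.any_cons, show (a == u) = false by simpa using hau] using hc
        have ih' := ih (List.nodup_cons.mp hnd).2 hc'
        have hne : (a == u) = false := by simpa using hau
        simp only [List.map_cons, List.sum_cons, hne, Bool.false_eq_true, if_false] at ih' ⊢
        omega
  · simp only [hc, if_neg]
    have hcf : PySem.Dict.contains (⟨l⟩ : PySem.Dict Int (List (Int × Int))) u = false := by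
      cases h2 : PySem.Dict.contains (⟨l⟩ : PySem.Dict Int (List (Int × Int))) u
      · rfl
      · exact absurd h2 hc
    rw [PySem.Dict.getD_of_not_contains (h := hcf)]
    simp

lemma pvSumVal_insert' (d : PySem.Dict Int (List (Int × Int))) (u : Int) (e : Int × Int)
    (hnd : d.keys.Nodup) :
    ((d.insert u ((d.getD u []) ++ [e])).items.map (fun kv => kv.2.length)).sum
      = (d.items.map (fun kv => kv.2.length)).sum + 1 := by
  obtain ⟨l⟩ := d
  exact pvSumVal_insert l u e (by simpa [PySem.Dict.keys] using hnd)

lemma pvSv_nil_le (times : List (List Int)) : pvSv (pvAdjA times) [] ≤ times.length := by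
  unfold pvSv pvAdjA
  have main : ∀ (d : PySem.Dict Int (List (Int × Int))), d.keys.Nodup →
      ((times.foldl (fun d row =>
        match row with
        | [u, v, w] => d.modify u [] (fun l => l ++ [(v, w)])
        | _ => d) d).items.map (fun kv => kv.2.length)).sum
        ≤ (d.items.map (fun kv => kv.2.length)).sum + times.length := by
    induction times with
    | nil => intro d hd; simp
    | cons row t ih =>
      intro d hd
      simp only [List.foldl_cons, List.length_cons]
      match row with
      | [] => exact le_trans (ih d hd) (by omega)
      | [u] => exact le_trans (ih d hd) (by omega)
      | [u, v] => exact le_trans (ih d hd) (by omega)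
      | u :: v :: w :: y :: rest => exact le_trans (ih d hd) (by omega)
      | [u, v, w] =>
        have hstep := pvSumVal_insert' d u (v, w) hd
        have hnd' : (PySem.Dict.modify d u [] (fun l => l ++ [(v, w)])).keys.Nodup :=
          PySem.Dict.nodup_keys_insert _ _ _ hd
        have hle := ih _ hnd'
        refine le_trans hle ?_
        simp only [PySem.Dict.modify] at hstep ⊢
        omega
  have h0 := main PySem.Dict.empty (by simp [PySem.Dict.keys, PySem.Dict.empty])
  calc ((List.filter (fun kv => decide (kv.1 ∉ ([] : List Int)))
        ((times.foldl (fun d row =>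
          match row with
          | [u, v, w] => d.modify u [] (fun l => l ++ [(v, w)])
          | _ => d) PySem.Dict.empty).items)).map (fun kv => kv.2.length)).sum
      = (((times.foldl (fun d row =>
          match row with
          | [u, v, w] => d.modify u [] (fun l => l ++ [(v, w)])
          | _ => d) PySem.Dict.empty).items).map (fun kv => kv.2.length)).sum := by
        congr 1
        congr 1
        exact List.filter_eq_self.mpr (by intro a _; simp)
    _ ≤ _ := by simpa [PySem.Dict.empty] using h0

lemma pvSvl_congr (t : List (Int × List (Int × Int))) (visited : List Int) (v : Int)
    (hnv : ∀ p ∈ t, p.1 ≠ v) :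
    t.filter (fun kv => decide (kv.1 ∉ visited ++ [v])) = t.filter (fun kv => decide (kv.1 ∉ visited)) := by
  apply List.filter_congr
  intro p hp
  have := hnv p hp
  simp [List.mem_append, this]

lemma pvSvl_step (l : List (Int × List (Int × Int))) (visited : List Int) (v : Int)
    (hnd : (l.map Prod.fst).Nodup) (hv : v ∉ visited) :
    ((l.filter (fun kv => decide (kv.1 ∉ visited))).map (fun kv => kv.2.length)).sum =
    ((l.filter (fun kv => decide (kv.1 ∉ visited ++ [v]))).map (fun kv => kv.2.length)).sum
      + ((Option.map (fun x => x.2) (l.find? (fun p => p.1 == v))).getD []).length := by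
  induction l with
  | nil => simp
  | cons p t ih =>
    rcases p with ⟨a, val⟩
    simp only [List.map_cons] at hnd
    have hnd' := (List.nodup_cons.mp hnd).2
    by_cases hav : a = v
    · subst hav
      have hnotin : ∀ q ∈ t, q.1 ≠ a := by
        intro q hq
        have := (List.nodup_cons.mp hnd).1
        exact fun h => this (h ▸ List.mem_map_of_mem hq)
      simp only [List.filter_cons, List.find?_cons, beq_self_eq_true, Option.map_some]
      have h1 : decide ((a, val).1 ∉ visited) = true := by simpa using hv
      have h2 : decide ((a, val).1 ∉ visited ++ [a]) = false := by simp
      rw [h1, h2]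
      simp only [if_true, if_false, List.map_cons, List.sum_cons]
      rw [pvSvl_congr t visited a hnotin]
      simp [Option.getD]
      omega
    · simp only [List.filter_cons, List.find?_cons,
        show ((a, val).1 == v) = false by simpa using hav]
      have hmem : ((a, val).1 ∈ visited ++ [v]) ↔ ((a, val).1 ∈ visited) := by
        simp [List.mem_append, hav]
      by_cases ha : a ∈ visited
      · have h1 : decide ((a, val).1 ∉ visited) = false := by simpa using ha
        have h2 : decide ((a, val).1 ∉ visited ++ [v]) = false := by simp [hmem]; exact ha
        rw [h1, h2]
        simpa using ih hnd'
      · have h1 : decide ((a, val).1 ∉ visited) = true := by simpa using ha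
        have h2 : decide ((a, val).1 ∉ visited ++ [v]) = true := by simp [hav]; exact ha
        rw [h1, h2]
        simp only [if_true, List.map_cons, List.sum_cons]
        have := ih hnd'
        omega

lemma pvSv_step (adj : PySem.Dict Int (List (Int × Int))) (visited : List Int) (v : Int)
    (hnd : adj.keys.Nodup) (hv : v ∉ visited) :
    pvSv adj visited = pvSv adj (visited ++ [v]) + (adj.getD v []).length := by
  unfold pvSv
  obtain ⟨l⟩ := adj
  exact pvSvl_step l visited v (by simpa [PySem.Dict.keys] using hnd) hv

-- preservation of the invariant across the relaxation loop over v's out-edges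
lemma pvRelax (visited' : List Int) (w : Int)
    (l : List (Int × Int)) :
    ∀ (h : List (Int × Int)) (dist : PySem.Dict Int Int),
      h.Pairwise pvLe → dist.keys.Nodup → pvInv h dist visited' →
      ((l.foldl (fun h p => if p.1 ∈ visited' then h else pvPush (w + p.2, p.1) h) h).Pairwise pvLe ∧
       (l.foldl (fun dd p =>
          if p.1 ∈ visited' then dd
          else if dd.contains p.1 = false ∨ w + p.2 < dd.getD p.1 0
          then dd.insert p.1 (w + p.2) else dd) dist).keys.Nodup ∧
       pvInv (l.foldl (fun h p => if p.1 ∈ visited' then h else pvPush (w + p.2, p.1) h) h)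
             (l.foldl (fun dd p =>
                if p.1 ∈ visited' then dd
                else if dd.contains p.1 = false ∨ w + p.2 < dd.getD p.1 0
                then dd.insert p.1 (w + p.2) else dd) dist) visited' ∧
       (l.foldl (fun h p => if p.1 ∈ visited' then h else pvPush (w + p.2, p.1) h) h).length ≤ h.length + l.length) := by
  induction l with
  | nil => intro h dist hs hnd hinv; exact ⟨hs, hnd, hinv, by simp⟩
  | cons p t ih =>
    intro h dist hs hnd hinv
    simp only [List.foldl_cons]
    by_cases hp : p.1 ∈ visited'
    · rw [if_pos hp, if_pos hp]
      obtain ⟨h1, h2, h3, h4⟩ := ih h dist hs hnd hinv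
      exact ⟨h1, h2, h3, by simp only [List.length_cons]; omega⟩
    · rw [if_neg hp, if_neg hp]
      have hs1 : (pvPush (w + p.2, p.1) h).Pairwise pvLe := pvPush_sorted _ h hs
      have hlen1 : (pvPush (w + p.2, p.1) h).length = h.length + 1 := by
        simpa using (pvPush_perm (w + p.2, p.1) h).length_eq
      set dist₁ := if dist.contains p.1 = false ∨ w + p.2 < dist.getD p.1 0
          then dist.insert p.1 (w + p.2) else dist with hdist₁
      have hnd1 : dist₁.keys.Nodup := by
        rw [hdist₁]; split
        · exact PySem.Dict.nodup_keys_insert _ _ _ hnd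
        · exact hnd
      have hinv1 : pvInv (pvPush (w + p.2, p.1) h) dist₁ visited' := by
        intro u
        by_cases hu : u = p.1
        · subst hu
          rw [if_neg hp]
          have hw : pvWmin (pvPush (w + p.2, p.1) h) p.1 =
              some ((pvWmin h p.1).elim (w + p.2) (fun m => min (w + p.2) m)) :=
            pvWmin_push_self (e := (w + p.2, p.1)) h
          have hd0 : dist.get? p.1 = pvWmin h p.1 := by
            have := hinv p.1; rwa [if_neg hp] at this
          rw [hw]
          cases hm : pvWmin h p.1 with
          | none =>
            have hcf : dist.contains p.1 = false := by
              rw [PySem.Dict.contains_eq_isSome_get?, hd0, hm]; rfl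
            rw [hdist₁, if_pos (Or.inl hcf), PySem.Dict.get?_insert_self]
            simp
          | some m =>
            have hct : dist.contains p.1 = true := by
              rw [PySem.Dict.contains_eq_isSome_get?, hd0, hm]; rfl
            have hgd : dist.getD p.1 0 = m := by
              rw [PySem.Dict.getD_eq_get?_getD, hd0, hm]; rfl
            by_cases hlt : w + p.2 < m
            · rw [hdist₁, if_pos (Or.inr (hgd ▸ hlt)), PySem.Dict.get?_insert_self]
              simp only [Option.elim]
              congr 1
              omega
            · have hcond : ¬ (dist.contains p.1 = false ∨ w + p.2 < dist.getD p.1 0) := by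
                rw [hct, hgd]; simp [hlt]
              rw [hdist₁, if_neg hcond, hd0, hm]
              simp only [Option.elim]
              congr 1
              omega
        · have hne2 : ((w + p.2, p.1) : Int × Int).2 ≠ u := fun hh => hu hh.symm
          rw [pvWmin_push_ne h hne2]
          have hget : dist₁.get? u = dist.get? u := by
            rw [hdist₁]; split
            · exact PySem.Dict.get?_insert_of_ne (hne := hu) ..
            · rfl
          rw [hget]
          exact hinv u
      obtain ⟨h1, h2, h3, h4⟩ := ih _ _ hs1 hnd1 hinv1
      refine ⟨h1, h2, h3, ?_⟩
      simp only [List.length_cons]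
      omega

-- evaluation helpers for the two loops
lemma pvRunA_nil (adj : PySem.Dict Int (List (Int × Int))) (fa : Nat) (visited : List Int) (ans : Int) :
    pvRunA adj fa [] visited ans = (visited, ans) := by
  cases fa <;> rfl

lemma pvRunB_empty (adj : PySem.Dict Int (List (Int × Int))) (fb : Nat)
    (dist : PySem.Dict Int Int) (visited : List Int) (ans : Int)
    (hnd : dist.keys.Nodup) (hnone : ∀ u, dist.get? u = none) :
    pvRunB adj fb dist visited ans = (visited, ans) := by
  have hitems : dist.items = [] := pvDict_items_nil dist hnone
  cases fb with
  | zero => rfl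
  | succ fb =>
    simp only [pvRunB, hitems, pvMin2?_eq, List.foldl_nil]

-- the lock-step simulation of the two loops
lemma pvBisim (adj : PySem.Dict Int (List (Int × Int))) (hadj : adj.keys.Nodup) :
    ∀ (fa : Nat) (fb : Nat) (h : List (Int × Int)) (dist : PySem.Dict Int Int)
      (visited : List Int) (ans : Int),
      h.Pairwise pvLe → dist.keys.Nodup → pvInv h dist visited →
      h.length + pvSv adj visited ≤ fa → h.length + pvSv adj visited ≤ fb →
      pvRunA adj fa h visited ans = pvRunB adj fb dist visited ans := by
  intro fa
  induction fa with
  | zero =>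
    intro fb h dist visited ans hs hnd hinv hfa hfb
    have hh : h = [] := by
      cases h with
      | nil => rfl
      | cons a t => simp at hfa
    subst hh
    rw [pvRunA_nil]
    refine (pvRunB_empty adj fb dist visited ans hnd ?_).symm
    intro u
    have := hinv u
    by_cases hu : u ∈ visited <;> simp [hu, pvWmin] at this ⊢ <;> exact this
  | succ fa ih =>
    intro fb h dist visited ans hs hnd hinv hfa hfb
    cases h with
    | nil =>
      rw [pvRunA_nil]
      refine (pvRunB_empty adj fb dist visited ans hnd ?_).symm
      intro u
      have := hinv u
      by_cases hu : u ∈ visited <;> simp [hu, pvWmin] at this ⊢ <;> exact this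
    | cons e rest =>
      obtain ⟨w, v⟩ := e
      by_cases hv : v ∈ visited
      · -- a stale heap entry: A skips, B's state is untouched
        have hstep : pvRunA adj (fa + 1) ((w, v) :: rest) visited ans
            = pvRunA adj fa rest visited ans := by
          simp only [pvRunA, if_pos hv]
        have hb1 : rest.length + pvSv adj visited ≤ fa := by
          simp only [List.length_cons] at hfa; omega
        have hb2 : rest.length + pvSv adj visited ≤ fb := by
          simp only [List.length_cons] at hfb; omega
        rw [hstep]
        apply ih fb rest dist visited ans hs.of_cons hnd ?_ hb1 hb2
        intro u
        rw [hinv u]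
        by_cases hu : u ∈ visited
        · simp [hu]
        · rw [if_neg hu, if_neg hu,
            pvWmin_cons_ne rest (show ((w, v) : Int × Int).2 ≠ u from fun hh => hu (hh ▸ hv))]
      · -- the head is the next node both loops settle
        have hgv : dist.get? v = some w := by
          rw [hinv v, if_neg hv, pvWmin_head hs]
        have hmin : PySem.List.min2? dist.items (fun it => it.2) (fun it => it.1) = some (v, w) := by
          apply pvMin2?_spec dist.items (v, w) (PySem.Dict.mem_items_of_get?_eq_some dist hgv)
          intro y hy
          have hgy : dist.get? y.1 = some y.2 :=
            PySem.Dict.get?_of_mem_items dist (by simpa using hy) hnd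
          have hyv : y.1 ∉ visited ∧ pvWmin ((w, v) :: rest) y.1 = some y.2 := by
            have := hinv y.1
            rw [hgy] at this
            by_cases hu : y.1 ∈ visited
            · simp [hu] at this
            · rw [if_neg hu] at this; exact ⟨hu, this.symm⟩
          by_cases hyv1 : y.1 = v
          · left
            have hw2 : pvWmin ((w, v) :: rest) y.1 = some w := by rw [hyv1, pvWmin_head hs]
            have hy2 : y.2 = w := by
              have := hyv.2.symm.trans hw2
              simpa using this
            have hyeta : y = (y.1, y.2) := rfl
            rw [hyeta, hyv1, hy2]
          · have hmm := hyv.2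
            unfold pvWmin at hmm
            rw [List.min?_eq_some_iff] at hmm
            obtain ⟨hm1, _⟩ := hmm
            simp only [List.mem_map, List.mem_filter] at hm1
            obtain ⟨ee, ⟨hee, heq⟩, hfst⟩ := hm1
            have hee2 : ee = (y.2, y.1) := by
              obtain ⟨e1, e2⟩ := ee
              simp at heq hfst
              simp [heq, hfst]
            rw [hee2] at hee
            rcases List.mem_cons.mp hee with hmem | hmem
            · have : y.1 = v := by simpa using congrArg Prod.snd hmem
              exact absurd this hyv1
            · have hle := (List.pairwise_cons.mp hs).1 _ hmem
              unfold pvLe at hle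
              simp only at hle
              right
              show (v, w).2 < y.2 ∨ ((v, w).2 = y.2 ∧ (v, w).1 < y.1)
              simp only
              omega
        cases fb with
        | zero => exfalso; simp only [List.length_cons] at hfb; omega
        | succ fb =>
          have hstepA : pvRunA adj (fa + 1) ((w, v) :: rest) visited ans
              = pvRunA adj fa
                  ((adj.getD v []).foldl
                    (fun h p => if p.1 ∈ PySem.Set.add visited v then h else pvPush (w + p.2, p.1) h) rest)
                  (PySem.Set.add visited v) (max ans w) := by
            simp only [pvRunA, if_neg hv]
          have hstepB : pvRunB adj (fb + 1) dist visited ans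
              = pvRunB adj fb
                  ((adj.getD v []).foldl
                    (fun dd p =>
                      if p.1 ∈ PySem.Set.add visited v then dd
                      else if dd.contains p.1 = false ∨ w + p.2 < dd.getD p.1 0
                      then dd.insert p.1 (w + p.2) else dd) (dist.erase v))
                  (PySem.Set.add visited v) (if ans < w then w else ans) := by
            simp only [pvRunB, hmin]
          rw [hstepA, hstepB]
          have hvis : PySem.Set.add visited v = visited ++ [v] := PySem.Set.add_of_not_mem hv
          have hans : (if ans < w then w else ans) = max ans w := by split_ifs <;> omega
          rw [hvis, hans]
          have hinv' : pvInv rest (dist.erase v) (visited ++ [v]) := by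
            intro u
            rw [pvGet?_erase]
            by_cases huv : u = v
            · simp [huv]
            · rw [if_neg huv, hinv u]
              by_cases hu : u ∈ visited
              · simp [hu]
              · have hu' : u ∉ visited ++ [v] := by simp [hu, huv]
                rw [if_neg hu, if_neg hu',
                  pvWmin_cons_ne rest (show ((w, v) : Int × Int).2 ≠ u from fun hh => huv hh.symm)]
          obtain ⟨hr1, hr2, hr3, hr4⟩ := pvRelax (visited ++ [v]) w (adj.getD v []) rest (dist.erase v)
            hs.of_cons (pvNodup_keys_erase dist v hnd) hinv'
          have hsv := pvSv_step adj visited v hadj hv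
          apply ih fb _ _ _ _ hr1 hr2 hr3
          · simp only [List.length_cons] at hfa; omega
          · simp only [List.length_cons] at hfb; omega


-- ===== VERDICT (by name: the statement is the Claim_ definition above) =====
theorem network_bandwidth_spec : Claim_equal_network_bandwidth := by
  intro times n x hdom hpre
  unfold Spec_network_bandwidth network_bandwidth network_bandwidth_alt
  have hadjeq : (times.foldl (fun d row =>
      match row with
      | [u, v, w] => d.insert u ((d.getD u []) ++ [(v, w)])
      | _ => d) (PySem.Dict.empty : PySem.Dict Int (List (Int × Int)))) = pvAdjA times := rfl
  rw [hadjeq]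
  have hinv0 : pvInv [(0, x)] (PySem.Dict.empty.insert x 0) [] := by
    intro u
    by_cases hux : u = x
    · subst hux
      simp [PySem.Dict.get?, PySem.Dict.insert, PySem.Dict.empty, PySem.Dict.contains, pvWmin]
    · have : (x == u) = false := by simpa using fun hh => hux hh.symm
      simp [PySem.Dict.get?, PySem.Dict.insert, PySem.Dict.empty, PySem.Dict.contains, pvWmin, this]
  have hnd0 : (PySem.Dict.empty.insert x 0 : PySem.Dict Int Int).keys.Nodup := by
    simp [PySem.Dict.keys, PySem.Dict.insert, PySem.Dict.empty, PySem.Dict.contains]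
  have hb0 : ([( (0 : Int), x)] : List (Int × Int)).length + pvSv (pvAdjA times) [] ≤ times.length + 1 := by
    have := pvSv_nil_le times
    simp only [List.length_cons, List.length_nil]
    omega
  have hrun := pvBisim (pvAdjA times) (pvAdjA_keys_nodup times) (times.length + 1) (times.length + 1)
    [(0, x)] (PySem.Dict.empty.insert x 0) [] 0 (by simp) hnd0 hinv0 hb0 hb0
  show (if ((pvRunA (pvAdjA times) (times.length + 1) [(0, x)] PySem.Set.empty 0).1.length : Int) = n
      then (pvRunA (pvAdjA times) (times.length + 1) [(0, x)] PySem.Set.empty 0).2 else -1)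
    = (if ((pvRunB (pvAdjA times) (times.length + 1) (PySem.Dict.empty.insert x 0) PySem.Set.empty 0).1.length : Int) = n
      then (pvRunB (pvAdjA times) (times.length + 1) (PySem.Dict.empty.insert x 0) PySem.Set.empty 0).2 else -1)
  have hempty : (PySem.Set.empty : List Int) = [] := rfl
  rw [hempty, hrun]
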